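-- pv_equiv track=rewrite | github.com/surenderthakran/study | problems/compare_keypress_lists.py | stringify_keypresses
-- ===== SOURCE A (Python) =====
-- def stringify_keypresses(keys):
--   """Converts list of keypresses into string.
--
--   Args:
--     keys: List of strings depicting keys pressed.
--
--   Returns:
--     String
--   """
--   string = ''
--   for key in keys:
--     if key == 'backspace':
--       string = string[:-1]
--     else:
--       string += key
--
--   return string
-- ===== SOURCE B (Python) =====
-- def stringify_keypresses(keys):
--   parts = []
--   pending = 0
--   for key in reversed(keys):
--     if key == 'backspace':
--       pending += 1
--     elif len(key) <= pending:
--       pending -= len(key)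
--     else:
--       parts.append(key[:len(key) - pending])
--       pending = 0
--   return ''.join(reversed(parts))
-- ===== Notes on version B (the rewrite author's own statement) =====
-- stated objective: alternative
-- what changed: Replaces A's forward simulation (mutating a running string with [:-1] per backspace) by a single right-to-left pass with a pending-backspace counter that decides, per key, how many of its trailing characters survive, assembling the surviving pieces at the end.
import Mathlib
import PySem

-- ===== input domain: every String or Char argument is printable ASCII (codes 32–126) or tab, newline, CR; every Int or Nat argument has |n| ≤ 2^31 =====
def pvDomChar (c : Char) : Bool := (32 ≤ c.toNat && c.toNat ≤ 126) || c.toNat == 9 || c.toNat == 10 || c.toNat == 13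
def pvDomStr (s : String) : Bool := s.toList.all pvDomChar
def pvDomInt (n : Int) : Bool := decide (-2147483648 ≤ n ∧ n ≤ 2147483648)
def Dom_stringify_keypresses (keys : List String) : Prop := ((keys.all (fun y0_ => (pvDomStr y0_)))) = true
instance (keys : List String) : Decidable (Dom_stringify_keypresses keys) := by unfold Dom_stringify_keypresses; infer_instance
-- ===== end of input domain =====

-- B traverses the keys right-to-left with a pending-backspace counter that decides how many
-- trailing characters of each key survive, instead of A's forward string simulation (objective: alternative).

-- ===== PORT A =====
def stringify_keypresses (keys : List String) : String :=
  keys.foldl (fun string key =>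
    if key == "backspace" then PySem.Str.slice string none (some (-1))
    else string ++ key) ""

-- ===== PORT B =====
-- one step of B's reversed loop; state = (parts so far in processing order, pending backspaces)
def altStep (st : List (List Char) × Nat) (key : String) : List (List Char) × Nat :=
  if key == "backspace" then (st.1, st.2 + 1)
  else if key.toList.length ≤ st.2 then (st.1, st.2 - key.toList.length)
  else (st.1 ++ [key.toList.take (key.toList.length - st.2)], 0)

def stringify_keypresses_alt (keys : List String) : String :=
  let st := keys.reverse.foldl altStep ([], 0)
  String.ofList st.1.reverse.flatten

-- ===== PRECONDITION & SPEC =====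
def Spec_stringify_keypresses (keys : List String) (out : String) : Prop := out = stringify_keypresses_alt keys
instance (keys : List String) (out : String) : Decidable (Spec_stringify_keypresses keys out) := by unfold Spec_stringify_keypresses; infer_instance

-- ===== CLAIM (what is proved, stated in full; the proofs are below) =====
def Claim_equal_stringify_keypresses : Prop := ∀ (keys : List String), Dom_stringify_keypresses keys → Spec_stringify_keypresses keys (stringify_keypresses keys)

-- ===== LEMMAS AND PROOFS =====

-- canonical right-to-left recursion: (surviving chars, pending backspaces) of a key list
def resBP : List String → List Char × Nat
  | [] => ([], 0)
  | k :: ks =>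
    if k == "backspace" then ((resBP ks).1, (resBP ks).2 + 1)
    else if k.toList.length ≤ (resBP ks).2 then ((resBP ks).1, (resBP ks).2 - k.toList.length)
    else (k.toList.take (k.toList.length - (resBP ks).2) ++ (resBP ks).1, 0)

-- A at the character level
theorem stringify_keypresses_toList (keys : List String) (s : String) :
    (keys.foldl (fun string key =>
      if key == "backspace" then PySem.Str.slice string none (some (-1))
      else string ++ key) s).toList
    = keys.foldl (fun cs key =>
      if key == "backspace" then cs.dropLast else cs ++ key.toList) s.toList := by
  induction keys generalizing s with
  | nil => rfl
  | cons k ks ih =>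
    simp only [List.foldl_cons]
    by_cases h : k == "backspace"
    · rw [if_pos h, if_pos h, ih]
      congr 1
      exact PySem.Str.slice_to_neg_one s
    · rw [if_neg h, if_neg h, ih]
      congr 1
      simp

-- main invariant: A's char-level fold from any start s equals s minus pending trailing chars plus resBP's output
theorem applyA_eq_resBP (keys : List String) (s : List Char) :
    keys.foldl (fun cs key =>
      if key == "backspace" then cs.dropLast else cs ++ key.toList) s
    = s.take (s.length - (resBP keys).2) ++ (resBP keys).1 := by
  induction keys generalizing s with
  | nil => simp [resBP]
  | cons k ks ih =>
    simp only [List.foldl_cons, resBP]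
    by_cases h : k == "backspace"
    · rw [if_pos h, if_pos h, ih]
      congr 1
      rw [List.dropLast_eq_take, List.take_take, List.length_take]
      congr 1
      omega
    · rw [if_neg h, if_neg h, ih]
      by_cases h2 : k.toList.length ≤ (resBP ks).2
      · rw [if_pos h2]
        rw [String.length_toList] at h2
        simp only [List.take_append, List.length_append, String.length_toList]
        rw [show s.length + k.length - (resBP ks).2 - s.length = 0 by omega,
            show s.length + k.length - (resBP ks).2 = s.length - ((resBP ks).2 - k.length) by omega]
        simp
      · rw [if_neg h2]
        rw [String.length_toList] at h2
        simp only [List.take_append, List.length_append, String.length_toList]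
        rw [show s.length + k.length - (resBP ks).2 - s.length = k.length - (resBP ks).2 by omega,
            List.take_of_length_le (by omega : s.length ≤ s.length + k.length - (resBP ks).2)]
        simp [List.append_assoc]

-- one step of B's loop advances the resBP characterisation
theorem altStep_resBP (st : List (List Char) × Nat) (k : String) (ks : List String)
    (h1 : st.1.reverse.flatten = (resBP ks).1) (h2 : st.2 = (resBP ks).2) :
    (altStep st k).1.reverse.flatten = (resBP (k :: ks)).1 ∧ (altStep st k).2 = (resBP (k :: ks)).2 := by
  simp only [altStep, resBP, h2]
  split_ifs with h h2' <;> simp [h1, List.reverse_append]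

-- B's foldl-over-reverse state matches resBP (parts reversed-and-flattened, same pending)
theorem altFold_eq_resBP : ∀ (keys : List String),
    (keys.foldr (fun k st => altStep st k) ([], 0)).1.reverse.flatten = (resBP keys).1
    ∧ (keys.foldr (fun k st => altStep st k) ([], 0)).2 = (resBP keys).2
  | [] => ⟨rfl, rfl⟩
  | k :: ks => altStep_resBP _ k ks (altFold_eq_resBP ks).1 (altFold_eq_resBP ks).2

-- ===== VERDICT (by name: the statement is the Claim_ definition above) =====
theorem stringify_keypresses_spec : Claim_equal_stringify_keypresses := by
  intro keys _
  unfold Spec_stringify_keypresses stringify_keypresses stringify_keypresses_alt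
  apply String.toList_injective
  rw [stringify_keypresses_toList]
  have h0 : ("".toList : List Char) = [] := rfl
  rw [h0, applyA_eq_resBP]
  simp only [List.foldl_reverse, String.toList_ofList]
  rw [(altFold_eq_resBP keys).1]
  simp
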